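-- pv_equiv track=rewrite | github.com/kimerikal-games/AoC-2025 | day/03/program.py | part1
-- ===== SOURCE A (Python) =====
-- def part1(banks: list[list[int]]) -> int:
--     total_joltage = 0
--
--     for bank in banks:
--         n = len(bank)
--         max_joltage = -1
--
--         for i in range(n):
--             for j in range(i + 1, n):
--                 joltage = bank[i] * 10 + bank[j]
--                 if joltage > max_joltage:
--                     max_joltage = joltage
--
--         total_joltage += max_joltage
--
--     return total_joltage
-- ===== SOURCE B (Python) =====
-- def part1(banks: list[list[int]]) -> int:
--     # One pass per bank: keep the running maximum of earlier elements (prefix max),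
--     # so the best pair ending at each position is prefix_max*10 + element.
--     total_joltage = 0
--     for bank in banks:
--         best = -1
--         if bank:
--             pref = bank[0]
--             for x in bank[1:]:
--                 cand = pref * 10 + x
--                 if cand > best:
--                     best = cand
--                 if x > pref:
--                     pref = x
--         total_joltage += best
--     return total_joltage
-- ===== Notes on version B (the rewrite author's own statement) =====
-- stated objective: faster
-- what changed: Replaced the quadratic all-pairs scan per bank by a single left-to-right pass that maintains the running prefix maximum, since the best pair ending at j is prefix_max*10 + bank[j].
import Mathlib
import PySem

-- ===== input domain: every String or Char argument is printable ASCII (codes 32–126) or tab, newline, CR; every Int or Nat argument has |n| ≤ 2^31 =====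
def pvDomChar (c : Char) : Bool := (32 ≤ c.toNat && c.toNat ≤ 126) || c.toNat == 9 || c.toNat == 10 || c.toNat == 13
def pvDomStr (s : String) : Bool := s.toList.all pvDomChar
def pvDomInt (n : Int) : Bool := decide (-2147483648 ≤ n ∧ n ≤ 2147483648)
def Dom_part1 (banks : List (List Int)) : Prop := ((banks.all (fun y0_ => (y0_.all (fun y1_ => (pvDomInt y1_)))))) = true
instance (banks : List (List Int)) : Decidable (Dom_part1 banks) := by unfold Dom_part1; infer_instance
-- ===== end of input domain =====

-- B replaces A's quadratic all-pairs scan per bank by a single prefix-max pass (faster, asymptotic).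


-- ===== PORT A =====
def part1 (banks : List (List Int)) : Int :=
  banks.foldl (fun total_joltage bank =>
    let n : Int := bank.length
    let max_joltage :=
      (PySem.List.pyRange 0 n 1).foldl (fun m i =>
        (PySem.List.pyRange (i + 1) n 1).foldl (fun m j =>
          let joltage := PySem.List.pyGetD bank i 0 * 10 + PySem.List.pyGetD bank j 0
          if joltage > m then joltage else m) m) (-1)
    total_joltage + max_joltage) 0

-- ===== PORT B =====
def part1_alt (banks : List (List Int)) : Int :=
  banks.foldl (fun total_joltage bank =>
    let best :=
      match bank with
      | [] => (-1 : Int)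
      | x :: xs =>
        (xs.foldl (fun (s : Int × Int) y =>
          let cand := s.2 * 10 + y
          (if cand > s.1 then cand else s.1, if y > s.2 then y else s.2)) (-1, x)).1
    total_joltage + best) 0

-- ===== PRECONDITION & SPEC =====
def Spec_part1 (banks : List (List Int)) (out : Int) : Prop := out = part1_alt banks
instance (banks : List (List Int)) (out : Int) : Decidable (Spec_part1 banks out) := by unfold Spec_part1; infer_instance

-- ===== CLAIM (what is proved, stated in full; the proofs are below) =====
def Claim_equal_part1 : Prop := ∀ (banks : List (List Int)), Dom_part1 banks → Spec_part1 banks (part1 banks)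

-- ===== LEMMAS AND PROOFS =====

-- A's inner loop: best of pairing a fixed left element p against each of ys, threaded through m.
def pairF (p m : Int) (ys : List Int) : Int :=
  ys.foldl (fun m y => if p * 10 + y > m then p * 10 + y else m) m

-- A's double loop, structurally: pair the head against the tail, then recurse on the tail.
def aRec : Int → List Int → Int
  | m, [] => m
  | m, x :: xs => aRec (pairF x m xs) xs

lemma pairF_nil (p m : Int) : pairF p m [] = m := rfl

lemma pairF_cons (p m y : Int) (ys : List Int) :
    pairF p m (y :: ys) = pairF p (max m (p * 10 + y)) ys := by
  simp only [pairF, List.foldl_cons]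
  congr 1
  by_cases h : p * 10 + y > m <;> simp [h] <;> omega

lemma pairF_max (p : Int) (ys : List Int) : ∀ m c : Int,
    pairF p (max m c) ys = max (pairF p m ys) c := by
  induction ys with
  | nil => intro m c; simp [pairF_nil]
  | cons z zs ih =>
    intro m c
    rw [pairF_cons, pairF_cons]
    rw [show max (max m c) (p * 10 + z) = max (max m (p * 10 + z)) c by omega]
    exact ih _ _

lemma pairF_maxarg (p y : Int) (ys : List Int) : ∀ m : Int,
    pairF (max p y) m ys = pairF y (pairF p m ys) ys := by
  induction ys with
  | nil => intro m; simp [pairF_nil]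
  | cons z zs ih =>
    intro m
    have hz : max p y * 10 + z = max (p * 10 + z) (y * 10 + z) := by
      rcases le_total p y with h | h
      · rw [max_eq_right h]; omega
      · rw [max_eq_left h]; omega
    simp only [pairF_cons, pairF_max, ih, hz, max_assoc]

-- B's scan with state (best, prefix max) computes A's head-against-tail recursion.
lemma scan_eq_aRec (xs : List Int) : ∀ m p : Int,
    (xs.foldl (fun (s : Int × Int) y =>
      let cand := s.2 * 10 + y
      (if cand > s.1 then cand else s.1, if y > s.2 then y else s.2)) (m, p)).1
    = aRec (pairF p m xs) xs := by
  induction xs with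
  | nil => intro m p; simp [pairF_nil, aRec]
  | cons y ys ih =>
    intro m p
    simp only [List.foldl_cons]
    rw [show (if p * 10 + y > m then p * 10 + y else m) = max m (p * 10 + y) by
          by_cases h : p * 10 + y > m <;> simp [h] <;> omega,
        show (if y > p then y else p) = max p y by
          by_cases h : y > p <;> simp [h] <;> omega]
    rw [ih, pairF_cons, aRec]
    congr 1
    exact pairF_maxarg p y ys _

-- A's index loops, converted to the structural recursion aRec.
lemma outer_loop (bank : List Int) : ∀ fuel k : Nat, ∀ m : Int, bank.length - k ≤ fuel →
    (PySem.List.pyRange (k : Int) (bank.length : Int) 1).foldl (fun m i =>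
      (PySem.List.pyRange (i + 1) (bank.length : Int) 1).foldl (fun m j =>
        let joltage := PySem.List.pyGetD bank i 0 * 10 + PySem.List.pyGetD bank j 0
        if joltage > m then joltage else m) m) m
    = aRec m (bank.drop k) := by
  intro fuel
  induction fuel with
  | zero =>
    intro k m h
    have hk : bank.length ≤ k := by omega
    rw [PySem.List.pyRange_one_eq_nil (by exact_mod_cast hk), List.drop_eq_nil_of_le hk]
    rfl
  | succ f ih =>
    intro k m h
    by_cases hk : k < bank.length
    · rw [PySem.List.pyRange_one_cons (by exact_mod_cast hk)]
      simp only [List.foldl_cons]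
      have hdrop : bank.drop k = bank[k] :: bank.drop (k + 1) :=
        (List.drop_eq_getElem_cons hk)
      have hget : PySem.List.pyGetD bank (k : Int) 0 = bank[k] := by
        simp [PySem.List.pyGetD_natCast, List.getElem?_eq_getElem hk]
      have h1 := PySem.List.foldl_pyRange_pyGetD' bank 0
        (fun m y => if bank[k] * 10 + y > m then bank[k] * 10 + y else m)
        m (a := (k : Int) + 1) (by omega)
      rw [show (((k : Int) + 1)).toNat = k + 1 from by omega] at h1
      have hinner : ((PySem.List.pyRange ((k : Int) + 1) (bank.length : Int) 1).foldl
          (fun m j =>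
            let joltage := PySem.List.pyGetD bank (k : Int) 0 * 10 + PySem.List.pyGetD bank j 0
            if joltage > m then joltage else m) m)
          = pairF bank[k] m (bank.drop (k + 1)) := by
        simp only [hget]
        exact h1
      rw [hinner]
      have : ((k : Int) + 1) = ((k + 1 : Nat) : Int) := by push_cast; ring
      rw [this, ih (k + 1) _ (by omega), hdrop, aRec]
    · have hk' : bank.length ≤ k := by omega
      rw [PySem.List.pyRange_one_eq_nil (by exact_mod_cast hk'), List.drop_eq_nil_of_le hk']
      rfl

-- per-bank agreement
lemma bank_eq (bank : List Int) :
    (PySem.List.pyRange 0 (bank.length : Int) 1).foldl (fun m i =>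
      (PySem.List.pyRange (i + 1) (bank.length : Int) 1).foldl (fun m j =>
        let joltage := PySem.List.pyGetD bank i 0 * 10 + PySem.List.pyGetD bank j 0
        if joltage > m then joltage else m) m) (-1)
    = (match bank with
      | [] => (-1 : Int)
      | x :: xs =>
        (xs.foldl (fun (s : Int × Int) y =>
          let cand := s.2 * 10 + y
          (if cand > s.1 then cand else s.1, if y > s.2 then y else s.2)) (-1, x)).1) := by
  have hA : (PySem.List.pyRange ((0 : Nat) : Int) (bank.length : Int) 1).foldl (fun m i =>
      (PySem.List.pyRange (i + 1) (bank.length : Int) 1).foldl (fun m j =>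
        let joltage := PySem.List.pyGetD bank i 0 * 10 + PySem.List.pyGetD bank j 0
        if joltage > m then joltage else m) m) (-1) = aRec (-1) bank :=
    outer_loop bank bank.length 0 (-1) (by omega)
  simp only [Nat.cast_zero] at hA
  rw [hA]
  cases bank with
  | nil => rfl
  | cons x xs => exact (scan_eq_aRec xs (-1) x).symm

-- ===== VERDICT (by name: the statement is the Claim_ definition above) =====
theorem part1_spec : Claim_equal_part1 := by
  intro banks _
  unfold Spec_part1 part1 part1_alt
  congr 1
  funext total bank
  exact congrArg (fun z => total + z) (bank_eq bank)
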